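-- pv_equiv track=rewrite | github.com/MemoritiK/FAISS-Data-Analysis-Snippets | backend/code_retrevial/index_generation.py | split_into_3_parts
-- ===== SOURCE A (Python) =====
-- def split_into_3_parts(text: str):
--     words = text.split()
--     n = len(words)
--
--     k = n // 3
--     r = n % 3
--
--     sizes = [
--         k + (1 if r > 0 else 0),
--         k + (1 if r > 1 else 0),
--         k
--     ]
--
--     parts = []
--     start = 0
--     for size in sizes:
--         end = start + size
--         parts.append(" ".join(words[start:end]))
--         start = end
--
--     return parts
-- ===== SOURCE B (Python) =====
-- def split_into_3_parts(text: str):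
--     words = text.split()
--     n = len(words)
--     p0, p1, p2 = [], [], []
--     for j, w in enumerate(words):
--         b = 3 * j // n
--         if b == 0:
--             p0.append(w)
--         elif b == 1:
--             p1.append(w)
--         else:
--             p2.append(w)
--     return [" ".join(p0), " ".join(p1), " ".join(p2)]
-- ===== Notes on version B (the rewrite author's own statement) =====
-- stated objective: alternative
-- what changed: Instead of computing three part sizes and slicing the word list with a running start/end accumulator, B makes a single pass over the enumerated words and routes each word to one of three accumulator lists by the closed-form bucket index 3*j//n, joining the buckets at the end.
import Mathlib
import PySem

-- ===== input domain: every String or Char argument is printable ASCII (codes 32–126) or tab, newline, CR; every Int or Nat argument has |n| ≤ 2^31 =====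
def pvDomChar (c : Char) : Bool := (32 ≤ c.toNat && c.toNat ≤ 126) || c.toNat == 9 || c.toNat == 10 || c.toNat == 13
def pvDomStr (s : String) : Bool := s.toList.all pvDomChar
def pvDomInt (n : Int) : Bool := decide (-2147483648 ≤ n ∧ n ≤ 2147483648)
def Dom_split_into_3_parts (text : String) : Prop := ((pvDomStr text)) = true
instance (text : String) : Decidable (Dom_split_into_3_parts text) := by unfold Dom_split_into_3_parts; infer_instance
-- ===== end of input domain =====

-- B makes one pass over the enumerated words, routing each word to one of three
-- accumulator lists by the bucket index 3*j//n, instead of A's size-list-and-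
-- running-accumulator slicing (alternative algorithm, same cost).


-- ===== PORT A =====
-- A's body on the word list (words = text.split())
def pvACore (words : List String) : List String :=
  let n : Int := words.length
  let k := PySem.Int.floordiv n 3
  let r := PySem.Int.mod n 3
  let sizes : List Int := [k + (if r > 0 then 1 else 0), k + (if r > 1 then 1 else 0), k]
  (sizes.foldl (fun (st : Int × List String) size =>
      let e := st.1 + size
      (e, st.2 ++ [PySem.Str.join " " (PySem.List.slice words (some st.1) (some e))]))
    (0, [])).2

def split_into_3_parts (text : String) : List String :=
  pvACore (PySem.Str.split₀ text)

-- ===== PORT B =====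
-- B's loop body: route word w (index j) to bucket 3*j//n
def pvBStep (n : Int) (st : List String × List String × List String) (p : Int × String) :
    List String × List String × List String :=
  let b := PySem.Int.floordiv (3 * p.1) n
  if b = 0 then (st.1 ++ [p.2], st.2.1, st.2.2)
  else if b = 1 then (st.1, st.2.1 ++ [p.2], st.2.2)
  else (st.1, st.2.1, st.2.2 ++ [p.2])

def pvBCore (words : List String) : List String :=
  let n : Int := words.length
  let st := (PySem.List.enumerate words 0).foldl (pvBStep n) ([], [], [])
  [PySem.Str.join " " st.1, PySem.Str.join " " st.2.1, PySem.Str.join " " st.2.2]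

def split_into_3_parts_alt (text : String) : List String :=
  pvBCore (PySem.Str.split₀ text)

-- ===== PRECONDITION & SPEC =====
def Spec_split_into_3_parts (text : String) (out : List String) : Prop := out = split_into_3_parts_alt text
instance (text : String) (out : List String) : Decidable (Spec_split_into_3_parts text out) := by unfold Spec_split_into_3_parts; infer_instance

-- ===== CLAIM =====
def Claim_equal_split_into_3_parts : Prop := ∀ (text : String), Dom_split_into_3_parts text → Spec_split_into_3_parts text (split_into_3_parts text)

-- ===== LEMMAS AND PROOFS =====

-- B's fold as three membership filters over the enumerated list
theorem pvFoldB_eq (n : Int) (l : List (Int × String)) : ∀ (s0 s1 s2 : List String),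
    l.foldl (pvBStep n) (s0, s1, s2)
    = (s0 ++ (l.filter (fun p => decide (PySem.Int.floordiv (3 * p.1) n = 0))).map (fun p => p.2),
       s1 ++ (l.filter (fun p => decide (PySem.Int.floordiv (3 * p.1) n = 1))).map (fun p => p.2),
       s2 ++ (l.filter (fun p => decide (PySem.Int.floordiv (3 * p.1) n ≠ 0 ∧
               PySem.Int.floordiv (3 * p.1) n ≠ 1))).map (fun p => p.2)) := by
  induction l with
  | nil => intro s0 s1 s2; simp
  | cons q l ih =>
    intro s0 s1 s2
    by_cases h0 : PySem.Int.floordiv (3 * q.1) n = 0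
    · simp [List.foldl_cons, pvBStep, h0, ih]
    · by_cases h1 : PySem.Int.floordiv (3 * q.1) n = 1
      · simp [List.foldl_cons, pvBStep, h1, ih]
      · simp [List.foldl_cons, pvBStep, h0, h1, ih]

-- filtering an enumerated list by an index interval is a drop/take slice
theorem pvFilt (lo hi : Nat) (ws : List String) : ∀ (s : Nat),
    ((PySem.List.enumerate ws (s : Int)).filter
        (fun p => decide ((lo : Int) ≤ p.1 ∧ p.1 < (hi : Int)))).map (fun p => p.2)
    = (ws.drop (lo - s)).take (hi - max lo s) := by
  induction ws with
  | nil => intro s; simp [PySem.List.enumerate_nil]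
  | cons w ws ih =>
    intro s
    have hcast : (s : Int) + 1 = ((s + 1 : Nat) : Int) := by push_cast; ring
    rw [PySem.List.enumerate_cons, hcast]
    by_cases hp : (lo : Int) ≤ (s : Int) ∧ (s : Int) < (hi : Int)
    · have hls : lo ≤ s := by exact_mod_cast hp.1
      have hsh : s < hi := by exact_mod_cast hp.2
      have h1 : lo - s = 0 := by omega
      have h2 : hi - max lo s = (hi - max lo (s + 1)) + 1 := by omega
      have h3 : lo - (s + 1) = 0 := by omega
      rw [List.filter_cons, if_pos (by simpa using hp), List.map_cons,
        ih (s + 1), h3, List.drop_zero, h1, List.drop_zero, h2, List.take_succ_cons]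
    · have hps : ¬ (lo ≤ s ∧ s < hi) := by
        intro h; exact hp ⟨by exact_mod_cast h.1, by exact_mod_cast h.2⟩
      rw [List.filter_cons, if_neg (by simpa using hp), ih (s + 1)]
      by_cases hls : s < lo
      · have h1 : lo - s = (lo - (s + 1)) + 1 := by omega
        have h2 : max lo (s + 1) = max lo s := by omega
        rw [h1, List.drop_succ_cons, h2]
      · have hhs : hi ≤ s := by omega
        have h1 : lo - s = 0 := by omega
        have h2 : hi - max lo s = 0 := by omega
        have h3 : hi - max lo (s + 1) = 0 := by omega
        rw [h1, h2, h3, List.drop_zero, List.take_zero, List.take_zero]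

-- bucket index as a pair of linear inequalities
theorem pvBucket_iff (nn k q : Nat) (hn : 0 < nn) :
    PySem.Int.floordiv (3 * (k : Int)) (nn : Int) = (q : Int)
    ↔ q * nn ≤ 3 * k ∧ 3 * k < (q + 1) * nn := by
  rw [PySem.Int.floordiv_eq_iff_of_pos (by exact_mod_cast hn)]
  constructor <;> intro h <;> exact ⟨by exact_mod_cast h.1, by exact_mod_cast h.2⟩

theorem pvCore_eq (words : List String) : pvACore words = pvBCore words := by
  cases words with
  | nil => rfl
  | cons w ws =>
    unfold pvACore pvBCore
    dsimp only
    set wl : List String := w :: ws with hwl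
    have hnpos : 0 < wl.length := by simp [hwl]
    set nn : Nat := wl.length with hnn
    have h3 : (0 : Int) < 3 := by norm_num
    set e1 : Nat := (nn + 2) / 3 with he1
    set e2 : Nat := (2 * nn + 2) / 3 with he2
    -- B side: fold = filters
    rw [pvFoldB_eq]
    -- turn each bucket filter into an index-interval filter
    have hco : ∀ (P Q : Int × String → Prop) [DecidablePred P] [DecidablePred Q],
        (∀ (k : Nat) (x : String), k < nn → (P ((k : Int), x) ↔ Q ((k : Int), x))) →
        (PySem.List.enumerate wl 0).filter (fun p => decide (P p))
        = (PySem.List.enumerate wl 0).filter (fun p => decide (Q p)) := by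
      intro P Q _ _ h
      apply List.filter_congr
      intro p hp
      rcases (PySem.List.mem_enumerate_iff _ _ _).1 hp with ⟨k, hk, rfl⟩
      have hk' : k < nn := by simpa [hnn] using hk
      simp only [zero_add]
      simp [h k _ hk']
    have hb0 : (PySem.List.enumerate wl 0).filter
          (fun p => decide (PySem.Int.floordiv (3 * p.1) (nn : Int) = 0))
        = (PySem.List.enumerate wl 0).filter
          (fun p => decide ((0 : Int) ≤ p.1 ∧ p.1 < ((e1 : Nat) : Int))) := by
      apply hco; intro k x hk
      dsimp only
      have := pvBucket_iff nn k 0 hnpos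
      simp only [Nat.cast_zero] at this
      rw [this]
      constructor
      · intro h; exact ⟨by positivity, by exact_mod_cast (by omega : k < e1)⟩
      · intro h
        have : k < e1 := by exact_mod_cast h.2
        omega
    have hb1 : (PySem.List.enumerate wl 0).filter
          (fun p => decide (PySem.Int.floordiv (3 * p.1) (nn : Int) = 1))
        = (PySem.List.enumerate wl 0).filter
          (fun p => decide (((e1 : Nat) : Int) ≤ p.1 ∧ p.1 < ((e2 : Nat) : Int))) := by
      apply hco; intro k x hk
      dsimp only
      have := pvBucket_iff nn k 1 hnpos
      simp only [Nat.cast_one] at this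
      rw [this]
      constructor
      · intro h
        exact ⟨by exact_mod_cast (by omega : e1 ≤ k), by exact_mod_cast (by omega : k < e2)⟩
      · intro h
        have h1 : e1 ≤ k := by exact_mod_cast h.1
        have h2 : k < e2 := by exact_mod_cast h.2
        omega
    have hb2 : (PySem.List.enumerate wl 0).filter
          (fun p => decide (PySem.Int.floordiv (3 * p.1) (nn : Int) ≠ 0 ∧
                            PySem.Int.floordiv (3 * p.1) (nn : Int) ≠ 1))
        = (PySem.List.enumerate wl 0).filter
          (fun p => decide (((e2 : Nat) : Int) ≤ p.1 ∧ p.1 < ((nn : Nat) : Int))) := by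
      apply hco; intro k x hk
      dsimp only
      have i0 := pvBucket_iff nn k 0 hnpos
      have i1 := pvBucket_iff nn k 1 hnpos
      simp only [Nat.cast_zero] at i0
      simp only [Nat.cast_one] at i1
      simp only [ne_eq, i0, i1]
      constructor
      · intro h
        rcases h with ⟨h0, h1⟩
        have : ¬ (0 * nn ≤ 3 * k ∧ 3 * k < (0 + 1) * nn) := h0
        have : ¬ (1 * nn ≤ 3 * k ∧ 3 * k < (1 + 1) * nn) := h1
        exact ⟨by exact_mod_cast (by omega : e2 ≤ k), by exact_mod_cast hk⟩
      · intro h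
        have h1 : e2 ≤ k := by exact_mod_cast h.1
        constructor <;> intro hc <;> omega
    have hf0 := pvFilt 0 e1 wl 0
    have hf1 := pvFilt e1 e2 wl 0
    have hf2 := pvFilt e2 nn wl 0
    simp only [Nat.cast_zero] at hf0 hf1 hf2
    rw [hb0, hb1, hb2, hf0, hf1, hf2]
    -- A side: evaluate the three-step fold and the Int arithmetic
    simp only [List.foldl_cons, List.foldl_nil,
      PySem.Int.floordiv_eq_ediv_of_pos h3, PySem.Int.mod_eq_emod_of_pos h3]
    have a1 : (0 : Int) + ((nn : Int) / 3 + if (nn : Int) % 3 > 0 then 1 else 0)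
        = ((e1 : Nat) : Int) := by split_ifs with h <;> omega
    rw [a1]
    have a2 : ((e1 : Nat) : Int) + ((nn : Int) / 3 + if (nn : Int) % 3 > 1 then 1 else 0)
        = ((e2 : Nat) : Int) := by split_ifs with h <;> omega
    rw [a2]
    have a3 : ((e2 : Nat) : Int) + (nn : Int) / 3 = ((nn : Nat) : Int) := by omega
    rw [a3]
    rw [show (0 : Int) = ((0 : Nat) : Int) by simp]
    rw [PySem.List.slice_natCast, PySem.List.slice_natCast, PySem.List.slice_natCast]
    simp
-- ===== VERDICT =====
theorem split_into_3_parts_spec : Claim_equal_split_into_3_parts := by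
  intro text _
  unfold Spec_split_into_3_parts split_into_3_parts split_into_3_parts_alt
  exact pvCore_eq _
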